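-- pv_equiv track=rewrite | github.com/pypi-data/pypi-mirror-155 | packages/Algoritmosnumericos/Algoritmosnumericos-0.3.0-py3-none-any.whl/Algoritmosnumericos/__init__.py | matriz_aum_id
-- ===== SOURCE A (Python) =====
-- def matriz_vacia(n, m):
--     """Ingresados los valores deseados de columnas y filas
--         retorna una matriz vacía de nxm
--     Parametros:
--         n: numero de filas
--         m: numero de columnas
--     Retorno:
--         Matriz vacia de nxm
--     """
--     vacia = []
--     for i in range(0, n):
--         vacia.append([])
--     for j in vacia:
--         for k in range(0, m):
--             j.append(0)
--     return vacia
--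
-- def matriz_aum_id(A):
--     """Dada una matriz cuadrada a, retorna una matriz aumentada con la identidad
--     Parametros:
--         A:matriz
--     Retorno
--         Matriz aumentada con la identidad"""
--     new = matriz_vacia(len(A), 2 * len(A))
--     for i in range(len(A)):
--         for j in range(len(A)):
--             new[i][j] = A[i][j]
--     for i in range(len(A)):
--         for j in range(len(A), 2 * len(A)):
--             if j - len(A) == i:
--                 new[i][j] = 1
--     return new
-- ===== SOURCE B (Python) =====
-- def matriz_aum_id(A):
--     """Dada una matriz cuadrada A, retorna la matriz aumentada con la identidad."""
--     n = len(A)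
--     res = []
--     fila_id = [1] + [0] * (n - 1)
--     for fila in A:
--         res.append([fila[j] for j in range(n)] + fila_id)
--         fila_id = [0] + fila_id[:-1]
--     return res
-- ===== Notes on version B (the rewrite author's own statement) =====
-- stated objective: alternative
-- what changed: B is a single pass over the rows themselves with an accumulator: it keeps the current identity row and shifts it right one step per row ([0]+fila_id[:-1]), appending the row prefix plus fila_id, instead of A's allocate-a-2n-wide-zero-matrix and overwrite-it-in-three-separate-index-assignment passes.
import Mathlib
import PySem

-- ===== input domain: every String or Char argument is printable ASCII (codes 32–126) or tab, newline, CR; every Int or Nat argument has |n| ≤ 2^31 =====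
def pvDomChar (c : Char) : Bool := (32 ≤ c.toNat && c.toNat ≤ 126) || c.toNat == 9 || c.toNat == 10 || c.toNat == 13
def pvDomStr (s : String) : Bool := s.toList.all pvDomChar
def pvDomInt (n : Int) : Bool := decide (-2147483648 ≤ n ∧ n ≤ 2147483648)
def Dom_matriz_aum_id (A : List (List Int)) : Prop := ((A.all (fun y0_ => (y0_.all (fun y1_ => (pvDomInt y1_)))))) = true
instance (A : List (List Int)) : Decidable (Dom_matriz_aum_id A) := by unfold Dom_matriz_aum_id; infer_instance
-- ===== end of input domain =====

-- B is a single pass over the rows with a shifting identity-row accumulator, instead of A's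
-- allocate-a-zero-matrix-then-overwrite-in-three-passes construction (objective: alternative).

-- ===== PORT A =====
-- helper for 'new[i][j] = v' on a list of lists (exact inside Pre_, where i and j are in range)
def pySet2 (M : List (List Int)) (i j : Nat) (v : Int) : List (List Int) :=
  M.set i ((M.getD i []).set j v)

-- matriz_vacia: append [] n times, then append 0 m times to every row
def matriz_vacia (n m : Nat) : List (List Int) :=
  ((List.range n).foldl (fun acc _ => acc ++ [([] : List Int)]) []).map
    (fun j => (List.range m).foldl (fun r _ => r ++ [(0 : Int)]) j)

-- literal transliteration of A; reads 'A[i][j]' are via getD, exact inside Pre_ (indices in range)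
def matriz_aum_id (A : List (List Int)) : List (List Int) :=
  let n := A.length
  let new := matriz_vacia n (2 * n)
  let new := (List.range n).foldl
    (fun M i => (List.range n).foldl (fun M j => pySet2 M i j ((A.getD i []).getD j 0)) M) new
  let new := (List.range n).foldl
    (fun M i => (List.range' n n).foldl (fun M j => if j - n = i then pySet2 M i j 1 else M) M) new
  new

-- ===== PORT B =====
-- literal transliteration of Source B: one fold over the rows, state = (res, fila_id);
-- 'fila[j]' is getD (exact inside Pre_, where j < len(fila)); fila_id[:-1] is a PySem slice;
-- [0]*(n-1) is List.replicate (n-1) 0 (Python's empty list for n = 0 matches Nat subtraction)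
def matriz_aum_id_alt (A : List (List Int)) : List (List Int) :=
  let n := A.length
  let fila_id := [(1 : Int)] ++ List.replicate (n - 1) (0 : Int)
  (A.foldl
    (fun (st : List (List Int) × List Int) fila =>
      (st.1 ++ [(List.range n).map (fun j => fila.getD j 0) ++ st.2],
       [(0 : Int)] ++ PySem.List.slice st.2 none (some (-1))))
    ([], fila_id)).1

-- ===== PRECONDITION & SPEC =====
-- Pre_ excludes exactly the inputs on which Python A raises IndexError: some row shorter than len(A).
def Pre_matriz_aum_id (A : List (List Int)) : Prop := ∀ row ∈ A, A.length ≤ row.length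
instance (A : List (List Int)) : Decidable (Pre_matriz_aum_id A) := by unfold Pre_matriz_aum_id; infer_instance
def pvWitness_matriz_aum_id : List (List Int) := [[1, 2], [3, 4]]
def Spec_matriz_aum_id (A : List (List Int)) (out : List (List Int)) : Prop := out = matriz_aum_id_alt A
instance (A : List (List Int)) (out : List (List Int)) : Decidable (Spec_matriz_aum_id A out) := by unfold Spec_matriz_aum_id; infer_instance

-- ===== CLAIM (what is proved, stated in full; the proofs are below) =====
def Claim_equal_matriz_aum_id : Prop := ∀ (A : List (List Int)), Dom_matriz_aum_id A → Pre_matriz_aum_id A → Spec_matriz_aum_id A (matriz_aum_id A)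

-- ===== LEMMAS AND PROOFS =====

-- the identity row with the 1 at position i
def idrow (n i : Nat) : List Int := (List.range n).map (fun k => if k = i then (1 : Int) else 0)

-- i-fold right shift (prepend 0, drop the last entry)
def shiftN : Nat → List Int → List Int
  | 0, e => e
  | i + 1, e => shiftN i ((0 : Int) :: e.dropLast)

theorem matriz_vacia_eq (n m : Nat) :
    matriz_vacia n m = List.replicate n (List.replicate m (0 : Int)) := by
  simp [matriz_vacia, List.map_replicate]

-- a fold whose every step rewrites row i in place factors through the row
theorem foldl_set_row {β : Type} (l : List β) (M : List (List Int)) (i : Nat)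
    (g : List Int → β → List Int) :
    l.foldl (fun M b => M.set i (g (M.getD i []) b)) M = M.set i (l.foldl g (M.getD i [])) := by
  induction l generalizing M with
  | nil =>
    simp only [List.foldl_nil]
    by_cases h : i < M.length
    · rw [List.getD_eq_getElem?_getD, List.getElem?_eq_getElem h]
      simp
    · rw [List.set_eq_of_length_le (Nat.le_of_not_lt h)]
  | cons b t ih =>
    simp only [List.foldl_cons]
    rw [ih]
    by_cases h : i < M.length
    · have hr : (M.set i (g (M.getD i []) b)).getD i [] = g (M.getD i []) b := by
        simp [List.getD_eq_getElem?_getD, h]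
      rw [hr, List.set_set]
    · rw [List.set_eq_of_length_le (Nat.le_of_not_lt h),
        List.set_eq_of_length_le (Nat.le_of_not_lt h),
        List.set_eq_of_length_le (Nat.le_of_not_lt h)]

-- a fold setting positions 0..n-1 of a row rewrites its first n entries
theorem foldl_set_prefix (n : Nat) (r : List Int) (f : Nat → Int) (h : n ≤ r.length) :
    (List.range n).foldl (fun r j => r.set j (f j)) r
      = (List.range n).map f ++ r.drop n := by
  induction n with
  | zero => simp
  | succ k ih =>
    rw [List.range_succ, List.foldl_append, ih (by omega)]
    simp only [List.foldl_cons, List.foldl_nil, List.map_append, List.map_cons, List.map_nil]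
    have hd : List.drop k r = r[k] :: List.drop (k + 1) r := List.drop_eq_getElem_cons (by omega)
    rw [List.set_append_right _ _ (by simp), hd]
    simp only [List.length_map, List.length_range, Nat.sub_self, List.set_cons_zero]
    simp [List.append_assoc]

-- a fold rewriting row i for each i = 0..n-1 is a map over the rows (M of length n)
theorem foldl_set_rows (g : Nat → List Int → List Int) :
    ∀ (n : Nat) (M : List (List Int)), M.length = n →
      (List.range n).foldl (fun M i => M.set i (g i (M.getD i []))) M
        = (List.range n).map (fun i => g i (M.getD i [])) := by
  intro n
  induction n with
  | zero =>
    intro M h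
    simp only [List.range_zero, List.foldl_nil, List.map_nil]
    exact List.length_eq_zero_iff.mp h
  | succ k ih =>
    intro M h
    obtain ⟨M', x, rfl⟩ : ∃ M' x, M = M' ++ [x] := by
      rcases List.eq_nil_or_concat M with rfl | ⟨M', x, hx⟩
      · simp at h
      · exact ⟨M', x, by simpa [List.concat_eq_append] using hx⟩
    have hlen : M'.length = k := by simpa using h
    rw [List.range_succ, List.foldl_append]
    have hcongr : ∀ (l : List Nat), (∀ i ∈ l, i < k) → ∀ L : List (List Int), L.length = k →
        l.foldl (fun M i => M.set i (g i (M.getD i []))) (L ++ [x])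
          = (l.foldl (fun M i => M.set i (g i (M.getD i []))) L) ++ [x] := by
      intro l
      induction l with
      | nil => intro _ L _; rfl
      | cons a t iht =>
        intro hm L hLk
        have ha : a < L.length := by rw [hLk]; exact hm a (by simp)
        simp only [List.foldl_cons]
        rw [List.getD_eq_getElem?_getD, List.getElem?_append_left ha,
          List.set_append_left _ _ ha, ← List.getD_eq_getElem?_getD]
        exact iht (fun i hi => hm i (by simp [hi])) _ (by simp [hLk])
    rw [hcongr (List.range k) (by simp) M' hlen, ih M' hlen]
    have hlen2 : ((List.range k).map (fun i => g i (M'.getD i []))).length = k := by simp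
    have hx1 : (M' ++ [x]).getD k [] = x := by
      rw [List.getD_eq_getElem?_getD, List.getElem?_append_right (by omega)]
      simp [hlen]
    have hx2 : ((List.range k).map (fun i => g i (M'.getD i [])) ++ [x]).getD k [] = x := by
      rw [List.getD_eq_getElem?_getD, List.getElem?_append_right hlen2.le]
      simp
    simp only [List.foldl_cons, List.foldl_nil]
    rw [hx2, List.set_append_right _ _ hlen2.le, List.map_append, hlen2, Nat.sub_self]
    congr 1
    · apply List.map_congr_left
      intro i hi
      have hik : i < k := List.mem_range.mp hi
      rw [List.getD_eq_getElem?_getD, List.getD_eq_getElem?_getD,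
        List.getElem?_append_left (show i < M'.length by omega)]
    · simp only [List.getD_eq_getElem?_getD] at hx1
      simp [hx1]

-- the conditional second-phase row loop writes a single 1 at position n+i
theorem foldl_cond_row (n i : Nat) (hi : i < n) (r : List Int) :
    (List.range' n n).foldl (fun r j => if j - n = i then r.set j 1 else r) r
      = r.set (n + i) 1 := by
  have key : ∀ (len a : Nat) (r : List Int), n ≤ a →
      (List.range' a len).foldl (fun r j => if j - n = i then r.set j 1 else r) r
        = if n + i < a + len ∧ a ≤ n + i then r.set (n + i) 1 else r := by
    intro len
    induction len with
    | zero =>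
      intro a r ha
      simp only [List.range'_zero, List.foldl_nil]
      rw [if_neg (by omega)]
    | succ k ihl =>
      intro a r ha
      rw [List.range'_succ, List.foldl_cons]
      by_cases hcond : a - n = i
      · have ha' : a = n + i := by omega
        rw [if_pos hcond, ihl (a + 1) _ (by omega), if_neg (by omega), if_pos (by omega), ha']
      · rw [if_neg hcond, ihl (a + 1) _ (by omega)]
        congr 1
        simp only [eq_iff_iff]
        omega
  rw [key n n r (le_refl n), if_pos (by omega)]

-- writing 1 into position i of an all-zero row is the identity row
theorem replicate_set_one (n i : Nat) (_hi : i < n) :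
    (List.replicate n (0 : Int)).set i 1 = idrow n i := by
  apply List.ext_getElem (by simp [idrow])
  intro j hj hj'
  simp only [List.length_set, List.length_replicate] at hj
  simp only [List.getElem_set, idrow, List.getElem_map, List.getElem_range,
    List.getElem_replicate]
  by_cases h : i = j <;> simp [h, eq_comm]

-- A computes, row by row, the first n entries of row i followed by the identity row i
theorem matriz_aum_id_map (A : List (List Int)) :
    matriz_aum_id A = (List.range A.length).map (fun i =>
      (List.range A.length).map (fun j => (A.getD i []).getD j 0) ++ idrow A.length i) := by
  unfold matriz_aum_id
  simp only [matriz_vacia_eq]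
  set n := A.length with hn
  have phase1 :
      (List.range n).foldl
        (fun M i => (List.range n).foldl (fun M j => pySet2 M i j ((A.getD i []).getD j 0)) M)
        (List.replicate n (List.replicate (2 * n) 0))
      = (List.range n).map (fun i =>
          (List.range n).map (fun j => (A.getD i []).getD j 0) ++ List.replicate n 0) := by
    calc (List.range n).foldl
          (fun M i => (List.range n).foldl (fun M j => pySet2 M i j ((A.getD i []).getD j 0)) M)
          (List.replicate n (List.replicate (2 * n) 0))
        = (List.range n).foldl
          (fun M i => M.set i ((List.range n).foldl (fun r j => r.set j ((A.getD i []).getD j 0)) (M.getD i [])))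
          (List.replicate n (List.replicate (2 * n) 0)) := by
          apply PySem.List.foldl_congr_mem
          intro M i _
          exact foldl_set_row (List.range n) M i (fun r j => r.set j ((A.getD i []).getD j 0))
      _ = (List.range n).map (fun i =>
            (List.range n).foldl (fun r j => r.set j ((A.getD i []).getD j 0))
              ((List.replicate n (List.replicate (2 * n) (0:Int))).getD i [])) :=
          foldl_set_rows
            (fun i r => (List.range n).foldl (fun r j => r.set j ((A.getD i []).getD j 0)) r)
            n (List.replicate n (List.replicate (2 * n) 0)) (by simp)
      _ = _ := by
          apply List.map_congr_left
          intro i hi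
          have hik : i < n := List.mem_range.mp hi
          have hrow : (List.replicate n (List.replicate (2 * n) (0:Int))).getD i []
              = List.replicate (2 * n) (0:Int) := by
            rw [List.getD_eq_getElem?_getD, List.getElem?_replicate, if_pos hik]
            rfl
          rw [hrow, foldl_set_prefix n _ _ (by simp only [List.length_replicate]; omega),
            List.drop_replicate]
          congr 2
          omega
  rw [phase1]
  have h2 : ∀ i M, i < M.length →
      (List.range' n n).foldl (fun M j => if j - n = i then pySet2 M i j 1 else M) M
        = M.set i ((List.range' n n).foldl (fun r j => if j - n = i then r.set j 1 else r) (M.getD i [])) := by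
    intro i M hiM
    have hshape : (List.range' n n).foldl (fun M j => if j - n = i then pySet2 M i j 1 else M) M
        = (List.range' n n).foldl
            (fun M j => M.set i (if j - n = i then (M.getD i []).set j 1 else M.getD i [])) M := by
      apply PySem.List.foldl_congr_mem
      intro M' j _
      by_cases hc : j - n = i
      · simp [hc, pySet2]
      · simp only [hc, if_false]
        by_cases hlt : i < M'.length
        · rw [List.getD_eq_getElem?_getD, List.getElem?_eq_getElem hlt]
          simp
        · rw [List.set_eq_of_length_le (Nat.le_of_not_lt hlt)]
    rw [hshape,
      foldl_set_row (List.range' n n) M i (fun r j => if j - n = i then r.set j 1 else r)]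
  set M₁ := (List.range n).map (fun i =>
      (List.range n).map (fun j => (A.getD i []).getD j 0) ++ List.replicate n 0) with hM₁
  have hM₁len : M₁.length = n := by simp [hM₁]
  calc (List.range n).foldl
        (fun M i => (List.range' n n).foldl (fun M j => if j - n = i then pySet2 M i j 1 else M) M) M₁
      = (List.range n).foldl
        (fun M i => M.set i ((List.range' n n).foldl (fun r j => if j - n = i then r.set j 1 else r) (M.getD i []))) M₁ := by
        have gen : ∀ (l : List Nat), (∀ i ∈ l, i < n) → ∀ M : List (List Int), M.length = n →
            l.foldl (fun M i => (List.range' n n).foldl (fun M j => if j - n = i then pySet2 M i j 1 else M) M) M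
            = l.foldl (fun M i => M.set i ((List.range' n n).foldl (fun r j => if j - n = i then r.set j 1 else r) (M.getD i []))) M := by
          intro l
          induction l with
          | nil => intro _ M _; rfl
          | cons a t iht =>
            intro hm M hMl
            simp only [List.foldl_cons]
            rw [h2 a M (by rw [hMl]; exact hm a (by simp))]
            exact iht (fun i hi => hm i (by simp [hi])) _ (by simp [hMl])
        exact gen (List.range n) (by simp) M₁ hM₁len
    _ = (List.range n).map (fun i =>
          (List.range' n n).foldl (fun r j => if j - n = i then r.set j 1 else r) (M₁.getD i [])) :=
        foldl_set_rows
          (fun i r => (List.range' n n).foldl (fun r j => if j - n = i then r.set j 1 else r) r)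
          n M₁ hM₁len
    _ = _ := by
        apply List.map_congr_left
        intro i hi
        have hik : i < n := List.mem_range.mp hi
        have hrow : M₁.getD i []
            = (List.range n).map (fun j => (A.getD i []).getD j 0) ++ List.replicate n (0:Int) := by
          rw [hM₁, List.getD_eq_getElem?_getD, List.getElem?_map, List.getElem?_range hik]
          rfl
        rw [hrow, foldl_cond_row n i hik, List.set_append_right _ _ (by simp)]
        simp only [List.length_map, List.length_range, Nat.add_sub_cancel_left]
        rw [replicate_set_one n i hik]

-- ===== B-side lemmas =====

-- one right shift of an identity row moves the 1 one place to the right (n ≥ 1)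
theorem shift_idrow (n i : Nat) (hn : 1 ≤ n) :
    (0 : Int) :: (idrow n i).dropLast = idrow n (i + 1) := by
  apply List.ext_getElem (by simp [idrow]; omega)
  intro j hj hj'
  simp only [idrow, List.length_map, List.length_range] at hj'
  cases j with
  | zero => simp [idrow]
  | succ j' =>
    have hj'' : j' < n - 1 := by
      simp only [List.length_cons, List.length_dropLast, idrow, List.length_map,
        List.length_range] at hj
      omega
    simp only [List.getElem_cons_succ, List.getElem_dropLast, idrow, List.getElem_map,
      List.getElem_range]
    by_cases h : j' = i <;> simp [h]

theorem shiftN_idrow (i : Nat) : ∀ (j n : Nat), 1 ≤ n → shiftN i (idrow n j) = idrow n (j + i) := by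
  induction i with
  | zero => intro j n _; simp [shiftN]
  | succ k ih =>
    intro j n hn
    show shiftN k ((0 : Int) :: (idrow n j).dropLast) = _
    rw [shift_idrow n j hn, ih (j + 1) n hn]
    congr 1
    omega

-- the fold of B, characterised: state.1 accumulates rows, state.2 is the shifted identity row
theorem foldl_B (f : List Int → List Int) :
    ∀ (L : List (List Int)) (res0 : List (List Int)) (e : List Int),
      L.foldl
        (fun (st : List (List Int) × List Int) fila =>
          (st.1 ++ [f fila ++ st.2], (0 : Int) :: st.2.dropLast)) (res0, e)
      = (res0 ++ L.mapIdx (fun i fila => f fila ++ shiftN i e), shiftN L.length e) := by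
  intro L
  induction L with
  | nil => intro res0 e; simp [shiftN]
  | cons fila L ih =>
    intro res0 e
    simp only [List.foldl_cons]
    rw [ih]
    simp [shiftN, List.mapIdx_cons, List.append_assoc]

-- B computes the same per-row description
theorem matriz_aum_id_alt_map (A : List (List Int)) :
    matriz_aum_id_alt A = (List.range A.length).map (fun i =>
      (List.range A.length).map (fun j => (A.getD i []).getD j 0) ++ idrow A.length i) := by
  unfold matriz_aum_id_alt
  set n := A.length with hn
  have hstep : (A.foldl
      (fun (st : List (List Int) × List Int) fila =>
        (st.1 ++ [(List.range n).map (fun j => fila.getD j 0) ++ st.2],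
         [(0 : Int)] ++ PySem.List.slice st.2 none (some (-1))))
      ([], [(1 : Int)] ++ List.replicate (n - 1) (0 : Int)))
      = (A.foldl
      (fun (st : List (List Int) × List Int) fila =>
        (st.1 ++ [(List.range n).map (fun j => fila.getD j 0) ++ st.2],
         (0 : Int) :: st.2.dropLast))
      ([], [(1 : Int)] ++ List.replicate (n - 1) (0 : Int))) := by
    apply PySem.List.foldl_congr_mem
    intro st fila _
    rw [PySem.List.slice_to_neg_one]
    rfl
  simp only []
  rw [hstep]
  rcases Nat.eq_zero_or_pos n with h0 | hpos
  · have hA : A = [] := List.length_eq_zero_iff.mp (by omega)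
    subst hA
    simp [h0]
  · have hinit : [(1 : Int)] ++ List.replicate (n - 1) (0 : Int) = idrow n 0 := by
      apply List.ext_getElem (by simp [idrow]; omega)
      intro j hj hj'
      cases j with
      | zero => simp [idrow]
      | succ j' =>
        simp only [List.singleton_append, List.getElem_cons_succ, List.getElem_replicate, idrow,
          List.getElem_map, List.getElem_range]
        simp
    rw [hinit, foldl_B (fun fila => (List.range n).map (fun j => fila.getD j 0)) A [] (idrow n 0)]
    simp only [List.nil_append]
    apply List.ext_getElem (by simp [hn])
    intro i hi hi'
    have hin : i < n := by simpa using hi'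
    have hAi : A.getD i [] = A[i]'(by omega) := by
      rw [List.getD_eq_getElem?_getD, List.getElem?_eq_getElem (by omega : i < A.length)]
      rfl
    rw [List.getElem_mapIdx, List.getElem_map, List.getElem_range,
      shiftN_idrow i 0 n hpos, hAi, Nat.zero_add]

-- ===== VERDICT (by name: the statement is the Claim_ definition above) =====
theorem matriz_aum_id_spec : Claim_equal_matriz_aum_id := by
  intro A _ _
  unfold Spec_matriz_aum_id
  rw [matriz_aum_id_map, matriz_aum_id_alt_map A]
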